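-- pv_equiv track=rewrite | github.com/meows4h/PrePurchasing | requests script/requests.py | get_course_arr
-- ===== SOURCE A (Python) =====
-- def get_course_arr(row, row_name):
--     '''Takes the current working row and extracts the course code(s),
--        converting it into a single array for usage.'''
--
--     course_code = ''
--     course_arr = [[], []]  # list 1 stores subject, list 2 stores number
--     subject_done = False
--
--     for idx, char in enumerate(row[row_name]):
--         # make sure each letter gets added
--         if char.isalpha():
--             course_code += char
--
--         # if the subject piece is just finishing, add a space
--         elif char.isnumeric() and not subject_done:
--             course_code += ' '
--             course_code += char
--             subject_done = True
--
--         # add each number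
--         elif char.isnumeric():
--             course_code += char
--
--         # if a slash is present, add the individual course
--         elif char == '/' or char == '\\':
--             course_temp = course_code.split(' ')
--             course_arr[0].append(course_temp[0])
--             course_arr[1].append(course_temp[1])
--             subject_done = False
--
--             # save the subject if it is two number codes
--             # otherwise remove it
--             if len(row[row_name]) > idx + 1:
--                 if row[row_name][idx + 1].isnumeric():
--                     course_code = course_temp[0]
--                 else:
--                     course_code = ''
--
--     return course_arr
-- ===== SOURCE B (Python) =====
-- def get_course_arr(row, row_name):
--     '''Segment-based rewrite: split the text on both delimiters, then for each
--        segment except the last take its alphanumeric characters and cut them at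
--        the first digit, instead of the original char-by-char flag machine.'''
--     text = ''.join('/' if c == '\\' else c for c in row[row_name])
--     segments = text.split('/')
--     subjects, numbers = [], []
--     carry = ''
--     for i in range(len(segments) - 1):
--         seg = segments[i]
--         kept = [c for c in seg if c.isalpha() or c.isnumeric()]
--         k = next((j for j, c in enumerate(kept) if c.isnumeric()), len(kept))
--         subj = (carry if seg[:1].isnumeric() else '') + ''.join(kept[:k])
--         subjects.append(subj)
--         numbers.append(''.join(kept[k:]))
--         carry = subj
--     return [subjects, numbers]
-- ===== Notes on version B (the rewrite author's own statement) =====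
-- stated objective: simpler
-- what changed: B replaces A's single char-by-char state machine (course_code string, subject_done flag, split-on-space at each delimiter, lookahead carry) by splitting the text into delimiter segments once and mapping each non-final segment to (subject, number) via filter-alphanumeric + cut-at-first-digit, with an explicit carried-subject variable.
import Mathlib
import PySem

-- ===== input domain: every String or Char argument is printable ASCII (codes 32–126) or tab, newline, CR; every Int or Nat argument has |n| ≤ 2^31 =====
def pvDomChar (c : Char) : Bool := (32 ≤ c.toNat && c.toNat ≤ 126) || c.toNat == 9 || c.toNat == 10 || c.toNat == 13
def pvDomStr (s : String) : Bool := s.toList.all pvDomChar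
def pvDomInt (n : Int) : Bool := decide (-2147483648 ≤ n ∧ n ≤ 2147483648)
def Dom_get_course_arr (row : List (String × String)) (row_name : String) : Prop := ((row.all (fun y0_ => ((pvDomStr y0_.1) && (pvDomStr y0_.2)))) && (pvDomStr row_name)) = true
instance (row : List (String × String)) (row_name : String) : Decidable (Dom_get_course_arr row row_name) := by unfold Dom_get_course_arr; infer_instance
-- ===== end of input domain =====

-- B rewrites A's single char-by-char flag machine as a split into delimiter
-- segments processed by filter + cut-at-first-digit (objective: simpler decomposition).

-- ===== PORT A =====
-- literal port of A's loop: state = (course_code, subject_done, course_arr[0], course_arr[1]);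
-- `none` = Python's IndexError on course_temp[1] (excluded by Pre_)
def get_course_arr_go (s : List Char) (items : List (Int × Char)) (code : List Char)
    (done : Bool) (subs nums : List String) : Option (List String × List String) :=
  match items with
  | [] => some (subs, nums)
  | (idx, c) :: rest =>
    if PySem.Chars.isalpha c then
      get_course_arr_go s rest (code ++ [c]) done subs nums
    else if PySem.Chars.isdigit c && !done then
      get_course_arr_go s rest (code ++ [' ', c]) true subs nums
    else if PySem.Chars.isdigit c then
      get_course_arr_go s rest (code ++ [c]) done subs nums
    else if c == '/' || c == '\\' then
      match PySem.Chars.splitOn code [' '] with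
      | t0 :: t1 :: _ =>
        get_course_arr_go s rest
          (if (s.length : Int) > idx + 1 then
            (if PySem.Chars.isdigit ((PySem.List.pyGet? s (idx + 1)).getD ' ') then t0 else [])
          else code)
          false (subs ++ [String.ofList t0]) (nums ++ [String.ofList t1])
      | _ => none  -- course_temp[1] raises IndexError (excluded by Pre_)
    else
      get_course_arr_go s rest code done subs nums

def get_course_arr (row : List (String × String)) (row_name : String) : List (List String) :=
  match PySem.Dict.get? ⟨row⟩ row_name with
  | none => [[], []]  -- Python raises KeyError here (excluded by Pre_)
  | some s =>
    match get_course_arr_go s.toList (PySem.List.enumerate s.toList 0) [] false [] [] with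
    | some (subs, nums) => [subs, nums]
    | none => [[], []]  -- Python raises IndexError here (excluded by Pre_)

-- ===== PORT B =====
def get_course_arr_alt (row : List (String × String)) (row_name : String) : List (List String) :=
  match PySem.Dict.get? ⟨row⟩ row_name with
  | none => [[], []]  -- Python raises KeyError here (excluded by Pre_)
  | some s =>
    let text := s.toList.map (fun c => if c == '\\' then '/' else c)
    let segments := PySem.Chars.splitOn text ['/']
    let res := segments.dropLast.foldl
      (fun (st : List String × List String × List Char) seg =>
        let kept := seg.filter (fun c => PySem.Chars.isalpha c || PySem.Chars.isdigit c)
        let k := kept.findIdx PySem.Chars.isdigit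
        let subj := (if PySem.Chars.strIsdigit (seg.take 1) then st.2.2 else []) ++ kept.take k
        (st.1 ++ [String.ofList subj], st.2.1 ++ [String.ofList (kept.drop k)], subj))
      ([], [], [])
    [res.1, res.2.1]

-- ===== PRECONDITION & SPEC =====
-- Pre_ excludes exactly the inputs where A raises: a missing key (KeyError) and texts in
-- which some '/'- or '\'-delimited segment other than the last contains no digit
-- (course_temp[1] raises IndexError there).
def Pre_get_course_arr (row : List (String × String)) (row_name : String) : Prop :=
  ((PySem.Dict.get? ⟨row⟩ row_name).elim false (fun s =>
    ((PySem.Chars.splitOn (s.toList.map (fun c => if c == '\\' then '/' else c)) ['/']).dropLast).all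
      (fun seg => seg.any PySem.Chars.isdigit))) = true
instance (row : List (String × String)) (row_name : String) : Decidable (Pre_get_course_arr row row_name) := by unfold Pre_get_course_arr; infer_instance

def pvWitness_get_course_arr : (List (String × String)) × String := ([("course", "MATH 101/102")], "course")

def Spec_get_course_arr (row : List (String × String)) (row_name : String) (out : List (List String)) : Prop := out = get_course_arr_alt row row_name
instance (row : List (String × String)) (row_name : String) (out : List (List String)) : Decidable (Spec_get_course_arr row row_name out) := by unfold Spec_get_course_arr; infer_instance

-- ===== CLAIM (what is proved, stated in full; the proofs are below) =====
def Claim_equal_get_course_arr : Prop := ∀ (row : List (String × String)) (row_name : String), Dom_get_course_arr row row_name → Pre_get_course_arr row row_name → Spec_get_course_arr row row_name (get_course_arr row row_name)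


-- ===== LEMMAS AND PROOFS =====

-- structural version of A's loop: the lookahead row[row_name][idx+1] is the head of the rest
def goA : List Char → List Char → Bool → List String → List String → Option (List String × List String)
  | [], _, _, subs, nums => some (subs, nums)
  | c :: rest, code, done, subs, nums =>
    if PySem.Chars.isalpha c then goA rest (code ++ [c]) done subs nums
    else if PySem.Chars.isdigit c && !done then goA rest (code ++ [' ', c]) true subs nums
    else if PySem.Chars.isdigit c then goA rest (code ++ [c]) done subs nums
    else if c == '/' || c == '\\' then
      match PySem.Chars.splitOn code [' '] with
      | t0 :: t1 :: _ =>
        goA rest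
          (match rest.head? with
           | some d => if PySem.Chars.isdigit d then t0 else []
           | none => code)
          false (subs ++ [String.ofList t0]) (nums ++ [String.ofList t1])
      | _ => none
    else goA rest code done subs nums

-- B's per-segment step (identical to the lambda in the port)
def stepB (st : List String × List String × List Char) (seg : List Char) :
    List String × List String × List Char :=
  let kept := seg.filter (fun c => PySem.Chars.isalpha c || PySem.Chars.isdigit c)
  let k := kept.findIdx PySem.Chars.isdigit
  let subj := (if PySem.Chars.strIsdigit (seg.take 1) then st.2.2 else []) ++ kept.take k
  (st.1 ++ [String.ofList subj], st.2.1 ++ [String.ofList (kept.drop k)], subj)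

def segsP (cs : List Char) : List (List Char) :=
  List.splitOnP (fun c => c == '/' || c == '\\') cs

-- ---- char facts ----
lemma alpha_not_digit (c : Char) (h : PySem.Chars.isalpha c = true) :
    PySem.Chars.isdigit c = false := by
  simp only [PySem.Chars.isalpha, PySem.Chars.isupper, PySem.Chars.islower, Bool.or_eq_true,
    Bool.and_eq_true, decide_eq_true_eq, PySem.Chars.isdigit, Bool.and_eq_false_imp,
    decide_eq_false_iff_not, not_le] at *
  have e1 : ('A' : Char).val.toNat = 65 := rfl
  have e2 : ('Z' : Char).val.toNat = 90 := rfl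
  have e3 : ('a' : Char).val.toNat = 97 := rfl
  have e4 : ('z' : Char).val.toNat = 122 := rfl
  have e5 : ('0' : Char).val.toNat = 48 := rfl
  have e6 : ('9' : Char).val.toNat = 57 := rfl
  rcases h with ⟨h1, h2⟩ | ⟨h1, h2⟩ <;>
    · intro h3
      rw [Char.le_def, UInt32.le_iff_toNat_le] at h1 h2 h3
      rw [Char.lt_def, UInt32.lt_iff_toNat_lt]
      omega

lemma mem_filter_alnum_ne_space {c : Char} {p : List Char}
    (h : c ∈ p.filter (fun c => PySem.Chars.isalpha c || PySem.Chars.isdigit c)) : c ≠ ' ' := by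
  rcases List.mem_filter.1 h with ⟨-, hc⟩
  rintro rfl
  exact absurd hc (by decide)

-- ---- branch equation lemmas for the two loops ----
lemma go_alpha (s : List Char) (idx : Int) (c : Char) (rest : List (Int × Char))
    (code : List Char) (done : Bool) (subs nums : List String)
    (h1 : PySem.Chars.isalpha c = true) :
    get_course_arr_go s ((idx, c) :: rest) code done subs nums
      = get_course_arr_go s rest (code ++ [c]) done subs nums := by
  conv_lhs => rw [get_course_arr_go]
  simp [h1]

lemma goA_alpha (c : Char) (rest code : List Char) (done : Bool) (subs nums : List String)
    (h1 : PySem.Chars.isalpha c = true) :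
    goA (c :: rest) code done subs nums = goA rest (code ++ [c]) done subs nums := by
  conv_lhs => rw [goA]
  simp [h1]

lemma go_digit_new (s : List Char) (idx : Int) (c : Char) (rest : List (Int × Char))
    (code : List Char) (subs nums : List String)
    (h1 : PySem.Chars.isalpha c = false) (h3 : PySem.Chars.isdigit c = true) :
    get_course_arr_go s ((idx, c) :: rest) code false subs nums
      = get_course_arr_go s rest (code ++ [' ', c]) true subs nums := by
  conv_lhs => rw [get_course_arr_go]
  simp [h1, h3]

lemma goA_digit_new (c : Char) (rest code : List Char) (subs nums : List String)
    (h1 : PySem.Chars.isalpha c = false) (h3 : PySem.Chars.isdigit c = true) :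
    goA (c :: rest) code false subs nums = goA rest (code ++ [' ', c]) true subs nums := by
  conv_lhs => rw [goA]
  simp [h1, h3]

lemma go_digit_more (s : List Char) (idx : Int) (c : Char) (rest : List (Int × Char))
    (code : List Char) (subs nums : List String)
    (h1 : PySem.Chars.isalpha c = false) (h3 : PySem.Chars.isdigit c = true) :
    get_course_arr_go s ((idx, c) :: rest) code true subs nums
      = get_course_arr_go s rest (code ++ [c]) true subs nums := by
  conv_lhs => rw [get_course_arr_go]
  simp [h1, h3]

lemma goA_digit_more (c : Char) (rest code : List Char) (subs nums : List String)
    (h1 : PySem.Chars.isalpha c = false) (h3 : PySem.Chars.isdigit c = true) :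
    goA (c :: rest) code true subs nums = goA rest (code ++ [c]) true subs nums := by
  conv_lhs => rw [goA]
  simp [h1, h3]

lemma go_delim (s : List Char) (idx : Int) (c : Char) (rest : List (Int × Char))
    (code : List Char) (done : Bool) (subs nums : List String)
    (h1 : PySem.Chars.isalpha c = false) (h3 : PySem.Chars.isdigit c = false)
    (h4 : (c == '/' || c == '\\') = true)
    (t0 t1 : List Char) (ts' : List (List Char))
    (hsp : PySem.Chars.splitOn code [' '] = t0 :: t1 :: ts') :
    get_course_arr_go s ((idx, c) :: rest) code done subs nums =
      get_course_arr_go s rest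
        (if (s.length : Int) > idx + 1 then
          (if PySem.Chars.isdigit ((PySem.List.pyGet? s (idx + 1)).getD ' ') then t0 else [])
        else code)
        false (subs ++ [String.ofList t0]) (nums ++ [String.ofList t1]) := by
  conv_lhs => rw [get_course_arr_go]
  rw [hsp]
  simp [h1, h3, h4]

lemma goA_delim (c : Char) (rest code : List Char) (done : Bool) (subs nums : List String)
    (h1 : PySem.Chars.isalpha c = false) (h3 : PySem.Chars.isdigit c = false)
    (h4 : (c == '/' || c == '\\') = true)
    (t0 t1 : List Char) (ts' : List (List Char))
    (hsp : PySem.Chars.splitOn code [' '] = t0 :: t1 :: ts') :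
    goA (c :: rest) code done subs nums =
      goA rest
        (match rest.head? with
         | some d => if PySem.Chars.isdigit d then t0 else []
         | none => code)
        false (subs ++ [String.ofList t0]) (nums ++ [String.ofList t1]) := by
  conv_lhs => rw [goA]
  rw [hsp]
  simp [h1, h3, h4]

lemma go_delim_err (s : List Char) (idx : Int) (c : Char) (rest : List (Int × Char))
    (code : List Char) (done : Bool) (subs nums : List String)
    (h1 : PySem.Chars.isalpha c = false) (h3 : PySem.Chars.isdigit c = false)
    (h4 : (c == '/' || c == '\\') = true)
    (hsp : (PySem.Chars.splitOn code [' ']).length ≤ 1) :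
    get_course_arr_go s ((idx, c) :: rest) code done subs nums = none := by
  conv_lhs => rw [get_course_arr_go]
  cases hs : PySem.Chars.splitOn code [' '] with
  | nil => simp [h1, h3, h4]
  | cons t ts =>
    cases ts with
    | nil => simp [h1, h3, h4]
    | cons t1 ts' => rw [hs] at hsp; simp at hsp

lemma goA_delim_err (c : Char) (rest code : List Char) (done : Bool) (subs nums : List String)
    (h1 : PySem.Chars.isalpha c = false) (h3 : PySem.Chars.isdigit c = false)
    (h4 : (c == '/' || c == '\\') = true)
    (hsp : (PySem.Chars.splitOn code [' ']).length ≤ 1) :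
    goA (c :: rest) code done subs nums = none := by
  conv_lhs => rw [goA]
  cases hs : PySem.Chars.splitOn code [' '] with
  | nil => simp [h1, h3, h4]
  | cons t ts =>
    cases ts with
    | nil => simp [h1, h3, h4]
    | cons t1 ts' => rw [hs] at hsp; simp at hsp

lemma go_skip (s : List Char) (idx : Int) (c : Char) (rest : List (Int × Char))
    (code : List Char) (done : Bool) (subs nums : List String)
    (h1 : PySem.Chars.isalpha c = false) (h3 : PySem.Chars.isdigit c = false)
    (h4 : (c == '/' || c == '\\') = false) :
    get_course_arr_go s ((idx, c) :: rest) code done subs nums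
      = get_course_arr_go s rest code done subs nums := by
  conv_lhs => rw [get_course_arr_go]
  simp [h1, h3, h4]

lemma goA_skip (c : Char) (rest code : List Char) (done : Bool) (subs nums : List String)
    (h1 : PySem.Chars.isalpha c = false) (h3 : PySem.Chars.isdigit c = false)
    (h4 : (c == '/' || c == '\\') = false) :
    goA (c :: rest) code done subs nums = goA rest code done subs nums := by
  conv_lhs => rw [goA]
  simp [h1, h3, h4]

-- ---- splitOn / splitOnP facts ----
lemma splitOnP_append_first (p : Char → Bool) (u : List Char) (d : Char) (v : List Char)
    (hu : ∀ c ∈ u, p c = false) (hd : p d = true) :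
    List.splitOnP p (u ++ d :: v) = u :: List.splitOnP p v := by
  induction u with
  | nil => simp [List.splitOnP_cons, hd]
  | cons c u ih =>
    have hc := hu c (by simp)
    simp only [List.cons_append, List.splitOnP_cons, hc]
    rw [ih (fun x hx => hu x (by simp [hx]))]
    simp

lemma splitOnP_no_match (p : Char → Bool) (v : List Char) (hv : ∀ c ∈ v, p c = false) :
    List.splitOnP p v = [v] := by
  induction v with
  | nil => simp
  | cons c v ih =>
    have hc := hv c (by simp)
    simp only [List.splitOnP_cons, hc]
    rw [ih (fun x hx => hv x (by simp [hx]))]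
    simp

lemma splitOn_go_single (d : Char) :
    ∀ (l : List Char) (fuel : Nat), l.length < fuel → ∀ (cur : List Char) (acc : List (List Char)),
    PySem.Chars.splitOn.go [d] fuel l cur acc
      = acc.reverse ++ (List.splitOnP (· == d) l).modifyHead (cur.reverse ++ ·) := by
  intro l
  induction l with
  | nil =>
    intro fuel hf cur acc
    match fuel, hf with
    | fuel + 1, _ => simp [PySem.Chars.splitOn.go]
  | cons c l ih =>
    intro fuel hf cur acc
    match fuel, hf with
    | fuel + 1, hf =>
      by_cases hc : c = d
      · subst hc
        have hpre : List.isPrefixOf [c] (c :: l) = true := by simp [List.isPrefixOf]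
        simp only [PySem.Chars.splitOn.go, hpre, if_pos]
        have hdrop : List.drop [c].length (c :: l) = l := rfl
        rw [hdrop, ih fuel (by simpa using hf) [] (cur.reverse :: acc)]
        have h2 : (List.splitOnP (· == c) l).modifyHead (([] : List Char).reverse ++ ·)
             = List.splitOnP (· == c) l := by
          cases List.splitOnP (· == c) l <;> simp
        rw [h2]
        simp [List.splitOnP_cons]
      · have hpre : List.isPrefixOf [d] (c :: l) = false := by
          simp [List.isPrefixOf]
          intro h
          exact hc h.symm
        simp only [PySem.Chars.splitOn.go, hpre, Bool.false_eq_true, if_neg, not_false_iff]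
        rw [ih fuel (by simpa using hf) (c :: cur) acc]
        have hcd : (c == d) = false := by simp [hc]
        simp only [List.splitOnP_cons, hcd, Bool.false_eq_true, if_neg, not_false_iff]
        rw [List.modifyHead_modifyHead]
        have hfun : ((fun x => cur.reverse ++ x) ∘ List.cons c)
            = (fun x => (c :: cur).reverse ++ x) := by
          funext x; simp
        rw [hfun]

lemma chars_splitOn_single (l : List Char) (d : Char) :
    PySem.Chars.splitOn l [d] = List.splitOnP (· == d) l := by
  unfold PySem.Chars.splitOn
  rw [splitOn_go_single d l (l.length + 1) (by omega)]
  cases List.splitOnP (· == d) l <;> simp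

lemma splitOn_space (u v : List Char) (hu : ' ' ∉ u) (hv : ' ' ∉ v) :
    PySem.Chars.splitOn (u ++ ' ' :: v) [' '] = [u, v] := by
  rw [chars_splitOn_single]
  rw [splitOnP_append_first _ u ' ' v (fun c hc => by simp; rintro rfl; exact hu hc) (by simp)]
  rw [splitOnP_no_match _ v (fun c hc => by simp; rintro rfl; exact hv hc)]

lemma segsP_map_slash (cs : List Char) :
    List.splitOnP (· == '/') (cs.map (fun c => if c == '\\' then '/' else c)) = segsP cs := by
  induction cs with
  | nil => simp [segsP]
  | cons c cs ih =>
    by_cases hc : (c == '/' || c == '\\') = true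
    · have h1 : ((if c == '\\' then '/' else c) == '/') = true := by
        rcases Bool.or_eq_true_iff.1 hc with h | h
        · simp_all
        · simp_all
      simp only [List.map_cons, List.splitOnP_cons, h1, if_pos, segsP, hc]
      rw [← segsP, ih]
    · have hc' : ¬c = '/' ∧ ¬c = '\\' := by simpa using hc
      have h1 : (c == '\\') = false := by simp [hc'.2]
      have h2 : (c == '/') = false := by simp [hc'.1]
      have hb : (c == '/' || c == '\\') = false := by simp [hc'.1, hc'.2]
      simp only [List.map_cons, h1, Bool.false_eq_true, if_neg, not_false_iff]
      rw [List.splitOnP_cons, ih]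
      show _ = segsP (c :: cs)
      unfold segsP
      rw [List.splitOnP_cons]
      simp only [h1, h2, Bool.or_false, Bool.false_eq_true, if_neg, not_false_iff]

lemma segsP_no_delim (cs : List Char) (h : ∀ c ∈ cs, (c == '/' || c == '\\') = false) :
    segsP cs = [cs] := splitOnP_no_match _ cs h

lemma segsP_append (p : List Char) (d : Char) (rest : List Char)
    (hp : ∀ c ∈ p, (c == '/' || c == '\\') = false) (hd : (d == '/' || d == '\\') = true) :
    segsP (p ++ d :: rest) = p :: segsP rest := splitOnP_append_first _ p d rest hp hd

lemma segsP_ne_nil (cs : List Char) : segsP cs ≠ [] := List.splitOnP_ne_nil _ cs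

lemma first_delim (cs : List Char) :
    (∀ c ∈ cs, (c == '/' || c == '\\') = false) ∨
    ∃ p d rest, cs = p ++ d :: rest ∧ (∀ c ∈ p, (c == '/' || c == '\\') = false) ∧
      (d == '/' || d == '\\') = true := by
  induction cs with
  | nil => left; simp
  | cons c cs ih =>
    by_cases hc : (c == '/' || c == '\\') = true
    · right; exact ⟨[], c, cs, by simp, by simp, hc⟩
    · rcases ih with h1 | ⟨p, d, rest, rfl, hp, hd⟩
      · left
        intro x hx
        rcases List.mem_cons.1 hx with rfl | hx
        · simpa using hc
        · exact h1 x hx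
      · right
        refine ⟨c :: p, d, rest, by simp, ?_, hd⟩
        intro x hx
        rcases List.mem_cons.1 hx with rfl | hx
        · simpa using hc
        · exact hp x hx

-- ---- bridge: the enumerate/index port equals the structural loop ----
lemma goA_bridge (rest : List Char) :
    ∀ (pre code : List Char) (done : Bool) (subs nums : List String),
    get_course_arr_go (pre ++ rest) (PySem.List.enumerate rest (pre.length : Int)) code done subs nums
      = goA rest code done subs nums := by
  induction rest with
  | nil => intro pre code done subs nums; simp [get_course_arr_go, goA, PySem.List.enumerate]
  | cons c rs ih =>
    intro pre code done subs nums
    rw [PySem.List.enumerate_cons]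
    have hpre1 : ((pre.length : Int) + 1) = (((pre ++ [c]).length : Nat) : Int) := by simp
    have happ : pre ++ c :: rs = (pre ++ [c]) ++ rs := by simp
    by_cases h1 : PySem.Chars.isalpha c = true
    · rw [go_alpha _ _ _ _ _ _ _ _ h1, goA_alpha _ _ _ _ _ _ h1, happ, hpre1, ih]
    · have h1' : PySem.Chars.isalpha c = false := by simpa using h1
      by_cases h3 : PySem.Chars.isdigit c = true
      · cases done with
        | false =>
          rw [go_digit_new _ _ _ _ _ _ _ h1' h3, goA_digit_new _ _ _ _ _ h1' h3,
            happ, hpre1, ih]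
        | true =>
          rw [go_digit_more _ _ _ _ _ _ _ h1' h3, goA_digit_more _ _ _ _ _ h1' h3,
            happ, hpre1, ih]
      · have h3' : PySem.Chars.isdigit c = false := by simpa using h3
        by_cases h4 : (c == '/' || c == '\\') = true
        · cases hsp : PySem.Chars.splitOn code [' '] with
          | nil =>
            rw [go_delim_err _ _ _ _ _ _ _ _ h1' h3' h4 (by rw [hsp]; simp),
              goA_delim_err _ _ _ _ _ _ h1' h3' h4 (by rw [hsp]; simp)]
          | cons t0 ts =>
            cases ts with
            | nil =>
              rw [go_delim_err _ _ _ _ _ _ _ _ h1' h3' h4 (by rw [hsp]; simp),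
                goA_delim_err _ _ _ _ _ _ h1' h3' h4 (by rw [hsp]; simp)]
            | cons t1 ts' =>
              rw [go_delim _ _ _ _ _ _ _ _ h1' h3' h4 t0 t1 ts' hsp,
                goA_delim _ _ _ _ _ _ h1' h3' h4 t0 t1 ts' hsp]
              cases rs with
              | nil =>
                have hng : ¬ (((pre ++ c :: ([] : List Char)).length : Int) > (pre.length : Int) + 1) := by
                  simp
                rw [if_neg hng, happ, hpre1, ih]
                rfl
              | cons d rs' =>
                have hg : (((pre ++ c :: d :: rs').length : Int) > (pre.length : Int) + 1) := by
                  push_cast [List.length_append, List.length_cons]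
                  omega
                rw [if_pos hg]
                have hget : PySem.List.pyGet? (pre ++ c :: d :: rs') ((pre.length : Int) + 1) = some d := by
                  rw [hpre1, PySem.List.pyGet?_natCast,
                    show pre ++ c :: d :: rs' = (pre ++ [c]) ++ d :: rs' by simp,
                    List.getElem?_append_right (by simp)]
                  simp
                rw [hget]
                simp only [Option.getD_some]
                rw [happ, hpre1, ih]
                rfl
        · have h4' : (c == '/' || c == '\\') = false := by simpa using h4
          rw [go_skip _ _ _ _ _ _ _ _ h1' h3' h4', goA_skip _ _ _ _ _ _ h1' h3' h4',
            happ, hpre1, ih]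

-- ---- phase lemmas for A's loop within one segment ----
lemma goA_done (p : List Char) (hp : ∀ c ∈ p, (c == '/' || c == '\\') = false) :
    ∀ (rest code : List Char) (subs nums : List String),
    goA (p ++ rest) code true subs nums
      = goA rest (code ++ p.filter (fun c => PySem.Chars.isalpha c || PySem.Chars.isdigit c)) true subs nums := by
  induction p with
  | nil => intro rest code subs nums; simp
  | cons c p ih =>
    intro rest code subs nums
    have hc := hp c (by simp)
    have hp' : ∀ x ∈ p, (x == '/' || x == '\\') = false := fun x hx => hp x (by simp [hx])
    show goA (c :: (p ++ rest)) code true subs nums = _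
    by_cases h1 : PySem.Chars.isalpha c = true
    · rw [goA_alpha _ _ _ _ _ _ h1, ih hp', List.filter_cons_of_pos (by simp [h1])]
      simp
    · have h1' : PySem.Chars.isalpha c = false := by simpa using h1
      by_cases h3 : PySem.Chars.isdigit c = true
      · rw [goA_digit_more _ _ _ _ _ h1' h3, ih hp', List.filter_cons_of_pos (by simp [h3])]
        simp
      · have h3' : PySem.Chars.isdigit c = false := by simpa using h3
        rw [goA_skip _ _ _ _ _ _ h1' h3' hc, ih hp',
          List.filter_cons_of_neg (by simp [h1', h3'])]

lemma goA_start (p : List Char) (hp : ∀ c ∈ p, (c == '/' || c == '\\') = false) :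
    ∀ (rest code0 : List Char) (subs nums : List String),
    goA (p ++ rest) code0 false subs nums
      = if (p.filter (fun c => PySem.Chars.isalpha c || PySem.Chars.isdigit c)).findIdx PySem.Chars.isdigit
            = (p.filter (fun c => PySem.Chars.isalpha c || PySem.Chars.isdigit c)).length
        then goA rest (code0 ++ p.filter (fun c => PySem.Chars.isalpha c || PySem.Chars.isdigit c)) false subs nums
        else goA rest
          (code0
            ++ (p.filter (fun c => PySem.Chars.isalpha c || PySem.Chars.isdigit c)).take
                ((p.filter (fun c => PySem.Chars.isalpha c || PySem.Chars.isdigit c)).findIdx PySem.Chars.isdigit)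
            ++ ' ' :: (p.filter (fun c => PySem.Chars.isalpha c || PySem.Chars.isdigit c)).drop
                ((p.filter (fun c => PySem.Chars.isalpha c || PySem.Chars.isdigit c)).findIdx PySem.Chars.isdigit))
          true subs nums := by
  induction p with
  | nil => intro rest code0 subs nums; simp
  | cons c p ih =>
    intro rest code0 subs nums
    have hc := hp c (by simp)
    have hp' : ∀ x ∈ p, (x == '/' || x == '\\') = false := fun x hx => hp x (by simp [hx])
    show goA (c :: (p ++ rest)) code0 false subs nums = _
    by_cases h1 : PySem.Chars.isalpha c = true
    · rw [goA_alpha _ _ _ _ _ _ h1, ih hp']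
      have hd : PySem.Chars.isdigit c = false := alpha_not_digit c h1
      rw [List.filter_cons_of_pos (by simp [h1])]
      simp only [List.findIdx_cons, hd, cond_false, List.length_cons]
      by_cases hk : (p.filter (fun c => PySem.Chars.isalpha c || PySem.Chars.isdigit c)).findIdx PySem.Chars.isdigit
          = (p.filter (fun c => PySem.Chars.isalpha c || PySem.Chars.isdigit c)).length
      · rw [if_pos hk, if_pos (by omega)]
        simp
      · rw [if_neg hk, if_neg (by omega)]
        simp [List.take_succ_cons, List.drop_succ_cons]
    · have h1' : PySem.Chars.isalpha c = false := by simpa using h1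
      by_cases h3 : PySem.Chars.isdigit c = true
      · rw [goA_digit_new _ _ _ _ _ h1' h3, goA_done p hp',
          List.filter_cons_of_pos (by simp [h3])]
        simp only [List.findIdx_cons, h3, cond_true, List.length_cons]
        rw [if_neg (by omega)]
        simp
      · have h3' : PySem.Chars.isdigit c = false := by simpa using h3
        rw [goA_skip _ _ _ _ _ _ h1' h3' hc, ih hp',
          List.filter_cons_of_neg (by simp [h1', h3'])]

-- ---- main invariant: A's loop = B's fold over the delimiter segments ----
lemma goA_main : ∀ (n : Nat) (cs : List Char), cs.length ≤ n →
    ∀ (code0 carry : List Char) (subs nums : List String),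
    ' ' ∉ carry →
    (∀ seg ∈ (segsP cs).dropLast, seg.any PySem.Chars.isdigit = true) →
    (code0 = (match cs.head? with
              | some c => if PySem.Chars.isdigit c then carry else []
              | none => []) ∨ cs = []) →
    goA cs code0 false subs nums
      = some ((((segsP cs).dropLast).foldl stepB (subs, nums, carry)).1,
              (((segsP cs).dropLast).foldl stepB (subs, nums, carry)).2.1) := by
  intro n
  induction n with
  | zero =>
    intro cs hlen code0 carry subs nums _ _ _
    have : cs = [] := List.length_eq_zero_iff.1 (Nat.le_zero.1 hlen)
    subst this
    simp [goA, segsP]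
  | succ n ihn =>
    intro cs hlen code0 carry subs nums hsp hp hcode
    cases hcs : cs with
    | nil =>
      subst hcs
      simp [goA, segsP]
    | cons hd0 tl0 =>
      subst hcs
      rcases first_delim (hd0 :: tl0) with hnone | ⟨p, d, rest, heq, hpnd, hdel⟩
      · -- no delimiter at all: nothing is emitted
        rw [segsP_no_delim _ hnone]
        have hdl : ([hd0 :: tl0] : List (List Char)).dropLast = [] := rfl
        rw [hdl]
        simp only [List.foldl_nil]
        have h := goA_start (hd0 :: tl0) hnone [] code0 subs nums
        simp only [List.append_nil] at h
        rw [h]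
        split_ifs <;> simp [goA]
      · have hlen' : rest.length ≤ n := by
          have h0 : (p ++ d :: rest).length ≤ n + 1 := heq ▸ hlen
          simp only [List.length_append, List.length_cons] at h0
          omega
        rw [heq] at hp hcode ⊢
        have hseg : segsP (p ++ d :: rest) = p :: segsP rest := segsP_append p d rest hpnd hdel
        obtain ⟨x, xs, hsr⟩ : ∃ x xs, segsP rest = x :: xs := by
          cases h : segsP rest with
          | nil => exact absurd h (segsP_ne_nil rest)
          | cons x xs => exact ⟨x, xs, rfl⟩
        have hdrop : (segsP (p ++ d :: rest)).dropLast = p :: (segsP rest).dropLast := by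
          rw [hseg, hsr]; rfl
        rw [hdrop] at hp ⊢
        have hpdig : p.any PySem.Chars.isdigit = true := hp p (by simp)
        have hp' : ∀ seg ∈ (segsP rest).dropLast, seg.any PySem.Chars.isdigit = true :=
          fun seg hs => hp seg (by simp [hs])
        rw [goA_start p hpnd (d :: rest) code0 subs nums]
        set kept := p.filter (fun c => PySem.Chars.isalpha c || PySem.Chars.isdigit c) with hkept
        set k := kept.findIdx PySem.Chars.isdigit with hk
        have hklt : k < kept.length := by
          rw [hk]
          apply List.findIdx_lt_length.2
          rcases List.any_eq_true.1 hpdig with ⟨c, hcp, hcd⟩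
          exact ⟨c, List.mem_filter.2 ⟨hcp, by simp [hcd]⟩, hcd⟩
        rw [if_neg (by omega)]
        have hdor : d = '/' ∨ d = '\\' := by simpa using hdel
        have hda : PySem.Chars.isalpha d = false := by rcases hdor with rfl | rfl <;> decide
        have hdd : PySem.Chars.isdigit d = false := by rcases hdor with rfl | rfl <;> decide
        -- the value of code0
        have hcode' : code0 = (if PySem.Chars.strIsdigit (p.take 1) then carry else []) := by
          rcases hcode with hcode | hcode
          · cases p with
            | nil =>
              simp only [List.nil_append, List.head?_cons] at hcode
              rw [hcode, hdd]
              simp [PySem.Chars.strIsdigit]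
            | cons q p' =>
              simp only [List.cons_append, List.head?_cons] at hcode
              rw [hcode]
              have hq : PySem.Chars.strIsdigit ((q :: p').take 1) = PySem.Chars.isdigit q := by
                simp [PySem.Chars.strIsdigit]
              rw [hq]
          · exact absurd hcode (by simp)
        have hsubj : ' ' ∉ code0 ++ kept.take k := by
          intro hmem
          rcases List.mem_append.1 hmem with hmem | hmem
          · rw [hcode'] at hmem
            split_ifs at hmem
            · exact hsp hmem
            · simp at hmem
          · exact mem_filter_alnum_ne_space (List.take_subset _ _ hmem) rfl
        have hnum : ' ' ∉ kept.drop k := by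
          intro hmem
          exact mem_filter_alnum_ne_space (List.drop_subset _ _ hmem) rfl
        have hspl : PySem.Chars.splitOn (code0 ++ kept.take k ++ ' ' :: kept.drop k) [' ']
            = (code0 ++ kept.take k) :: (kept.drop k) :: [] := by
          rw [show code0 ++ kept.take k ++ ' ' :: kept.drop k
              = (code0 ++ kept.take k) ++ ' ' :: kept.drop k by simp [List.append_assoc]]
          exact splitOn_space _ _ hsubj hnum
        rw [goA_delim d rest _ true subs nums hda hdd hdel _ _ _ hspl]
        rw [ihn rest hlen'
          (match rest.head? with
           | some d' => if PySem.Chars.isdigit d' then code0 ++ kept.take k else []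
           | none => code0 ++ kept.take k ++ ' ' :: kept.drop k)
          (code0 ++ kept.take k)
          (subs ++ [String.ofList (code0 ++ kept.take k)])
          (nums ++ [String.ofList (kept.drop k)])
          hsubj hp'
          (by
            cases rest with
            | nil => right; rfl
            | cons r rs => left; simp)]
        -- B side: one fold step
        rw [List.foldl_cons]
        have hstep : stepB (subs, nums, carry) p
            = (subs ++ [String.ofList (code0 ++ kept.take k)],
               nums ++ [String.ofList (kept.drop k)],
               code0 ++ kept.take k) := by
          rw [hcode']
          rfl
        rw [hstep]

-- evaluation of the two ports once the dict lookup succeeds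
lemma portA_some (row : List (String × String)) (row_name : String) (s : String)
    (h : PySem.Dict.get? ⟨row⟩ row_name = some s) :
    get_course_arr row row_name
      = (match goA s.toList [] false [] [] with
         | some (subs, nums) => [subs, nums]
         | none => [[], []]) := by
  unfold get_course_arr
  rw [h]
  have hb : get_course_arr_go s.toList (PySem.List.enumerate s.toList 0) [] false [] []
      = goA s.toList [] false [] [] := by
    have := goA_bridge s.toList [] [] false [] []
    simpa using this
  show (match get_course_arr_go s.toList (PySem.List.enumerate s.toList 0) [] false [] [] with
        | some (subs, nums) => [subs, nums]
        | none => [[], []]) = _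
  rw [hb]

lemma portB_some (row : List (String × String)) (row_name : String) (s : String)
    (h : PySem.Dict.get? ⟨row⟩ row_name = some s) :
    get_course_arr_alt row row_name
      = [(((segsP s.toList).dropLast).foldl stepB ([], [], [])).1,
         (((segsP s.toList).dropLast).foldl stepB ([], [], [])).2.1] := by
  unfold get_course_arr_alt
  rw [h]
  show [(((PySem.Chars.splitOn (s.toList.map (fun c => if c == '\\' then '/' else c)) ['/']).dropLast).foldl stepB ([], [], [])).1,
        (((PySem.Chars.splitOn (s.toList.map (fun c => if c == '\\' then '/' else c)) ['/']).dropLast).foldl stepB ([], [], [])).2.1] = _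
  rw [chars_splitOn_single, segsP_map_slash]

-- ===== VERDICT (by name: the statement is the Claim_ definition above) =====
theorem get_course_arr_spec : Claim_equal_get_course_arr := by
  intro row row_name _hdom hpre
  unfold Spec_get_course_arr
  unfold Pre_get_course_arr at hpre
  cases hget : PySem.Dict.get? ⟨row⟩ row_name with
  | none => rw [hget] at hpre; simp at hpre
  | some s =>
    rw [hget] at hpre
    simp only [Option.elim] at hpre
    rw [chars_splitOn_single, segsP_map_slash] at hpre
    have hp : ∀ seg ∈ (segsP s.toList).dropLast, seg.any PySem.Chars.isdigit = true := by
      intro seg hs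
      exact List.all_eq_true.1 hpre seg hs
    rw [portA_some row row_name s hget, portB_some row row_name s hget]
    rw [goA_main s.toList.length s.toList le_rfl [] [] [] [] (by simp) hp
      (by left; cases s.toList.head? <;> simp)]
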